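-- pv_equiv track=rewrite | github.com/M0hanad1/Password-Manager | main.py | check
-- ===== SOURCE A (Python) =====
-- from string import ascii_uppercase, ascii_lowercase, punctuation, digits
--
-- def check(string: str) -> list:
-- 	result = []
--
-- 	for i in range(len(string)):
-- 		if (string[i] == '1' or string[i] == 'U') and ascii_uppercase not in result:
-- 			result.append(ascii_uppercase)
--
-- 		elif (string[i] == '2' or string[i] == 'L') and ascii_lowercase not in result:
-- 			result.append(ascii_lowercase)
--
-- 		elif (string[i] == '3' or string[i] == 'D') and digits not in result:
-- 			result.append(digits)
--
-- 		elif (string[i] == '4' or string[i] == 'P') and punctuation not in result: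
-- 			result.append(punctuation)
--
-- 	return result
-- ===== SOURCE B (Python) =====
-- from string import ascii_uppercase, ascii_lowercase, punctuation, digits
--
--
-- def check(string: str) -> list:
--     # Staged approach: one independent scan per character class collecting all
--     # trigger positions, then sort the found classes by their first position.
--     entries = []
--     for triggers, cls in ((('1', 'U'), ascii_uppercase),
--                           (('2', 'L'), ascii_lowercase),
--                           (('3', 'D'), digits),
--                           (('4', 'P'), punctuation)):
--         positions = [i for i, ch in enumerate(string) if ch in triggers]
--         if positions:
--             entries.append((positions[0], cls))
--     entries.sort(key=lambda e: e[0])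
--     return [cls for _, cls in entries]
-- ===== Notes on version B (the rewrite author's own statement) =====
-- stated objective: alternative
-- what changed: Replaces A's single accumulate-as-you-go pass over the string with staged per-class passes: for each of the four classes an independent scan collects all positions of its trigger characters, the first position (if any) tags the class, and the tagged classes are sorted by that position; correct because trigger characters of distinct classes are disjoint, so first positions are distinct and sorting by them reproduces A's first-trigger append order.
import Mathlib
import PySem

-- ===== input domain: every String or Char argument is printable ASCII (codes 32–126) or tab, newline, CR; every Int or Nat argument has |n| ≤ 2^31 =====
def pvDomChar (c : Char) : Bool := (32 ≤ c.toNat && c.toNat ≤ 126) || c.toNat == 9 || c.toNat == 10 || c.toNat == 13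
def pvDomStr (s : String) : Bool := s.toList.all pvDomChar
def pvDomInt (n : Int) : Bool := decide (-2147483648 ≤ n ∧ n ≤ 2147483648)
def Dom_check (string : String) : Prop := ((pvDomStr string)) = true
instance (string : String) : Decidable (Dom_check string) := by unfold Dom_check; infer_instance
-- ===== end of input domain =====

-- B replaces A's single accumulating pass with staged per-class position scans followed by a sort by first position (alternative decomposition, same cost).

-- ===== PORT A =====
-- module-level constants from Python's `string`
def pvUpper : String := "ABCDEFGHIJKLMNOPQRSTUVWXYZ"
def pvLower : String := "abcdefghijklmnopqrstuvwxyz"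
def pvDigits : String := "0123456789"
def pvPunct : String := "!\"#$%&'()*+,-./:;<=>?@[\\]^_`{|}~"

-- A's loop body (the if/elif chain, branches in order)
def checkStep (result : List String) (c : Char) : List String :=
  if (c == '1' || c == 'U') && !(result.contains pvUpper) then result ++ [pvUpper]
  else if (c == '2' || c == 'L') && !(result.contains pvLower) then result ++ [pvLower]
  else if (c == '3' || c == 'D') && !(result.contains pvDigits) then result ++ [pvDigits]
  else if (c == '4' || c == 'P') && !(result.contains pvPunct) then result ++ [pvPunct]
  else result

-- for i in range(len(string)): ... string[i] ...  (i is always in range, so pyGetD's default is never used)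
def check (string : String) : List String :=
  (PySem.List.pyRange 0 (PySem.Str.len string) 1).foldl
    (fun result i => checkStep result (PySem.List.pyGetD string.toList i ' ')) []

-- ===== PORT B =====
-- the literal tuple of (triggers, class) pairs B iterates over
def pvSpecs : List ((Char × Char) × String) :=
  [(('1', 'U'), pvUpper), (('2', 'L'), pvLower), (('3', 'D'), pvDigits), (('4', 'P'), pvPunct)]

def check_alt (string : String) : List String :=
  let entries := pvSpecs.foldl
    (fun entries spec =>
      let positions := ((PySem.List.enumerate string.toList 0).filter
        (fun q => q.2 == spec.1.1 || q.2 == spec.1.2)).map Prod.fst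
      match positions with
      | [] => entries
      | i :: _ => entries ++ [(i, spec.2)])
    ([] : List (Int × String))
  (PySem.List.sorted entries (fun e => e.1)).map Prod.snd

-- ===== PRECONDITION & SPEC =====
def Spec_check (string : String) (out : List String) : Prop := out = check_alt string
instance (string : String) (out : List String) : Decidable (Spec_check string out) := by unfold Spec_check; infer_instance

-- ===== CLAIM (what is proved, stated in full; the proofs are below) =====
def Claim_equal_check : Prop := ∀ (string : String), Dom_check string → Spec_check string (check string)

-- ===== LEMMAS AND PROOFS =====

-- trigger predicates of the four classes
def pU (c : Char) : Bool := c == '1' || c == 'U'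
def pL (c : Char) : Bool := c == '2' || c == 'L'
def pD (c : Char) : Bool := c == '3' || c == 'D'
def pP (c : Char) : Bool := c == '4' || c == 'P'

-- first index ≥ n (counting from n along cs) of a character satisfying p
def firstPos (p : Char → Bool) : List Char → Int → Option Int
  | [], _ => none
  | c :: cs, n => if p c then some n else firstPos p cs (n + 1)

-- proof device: a dict mapping each class to the first index of one of its triggers,
-- built by a per-character fold mirroring A's branch structure
def tblStep (d : PySem.Dict String Int) (p : Int × Char) : PySem.Dict String Int :=
  if pU p.2 && !(d.contains pvUpper) then d.insert pvUpper p.1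
  else if pL p.2 && !(d.contains pvLower) then d.insert pvLower p.1
  else if pD p.2 && !(d.contains pvDigits) then d.insert pvDigits p.1
  else if pP p.2 && !(d.contains pvPunct) then d.insert pvPunct p.1
  else d

def tbl (cs : List Char) : PySem.Dict String Int :=
  (PySem.List.enumerate cs 0).foldl tblStep PySem.Dict.empty

-- the four-way "cls got first position i" disjunction
def D4 (cs : List Char) (n : Int) (cls : String) (i : Int) : Prop :=
  (cls = pvUpper ∧ firstPos pU cs n = some i) ∨ (cls = pvLower ∧ firstPos pL cs n = some i)
  ∨ (cls = pvDigits ∧ firstPos pD cs n = some i) ∨ (cls = pvPunct ∧ firstPos pP cs n = some i)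

theorem contains_map_fst (d : PySem.Dict String Int) (s : String) :
    (d.items.map Prod.fst).contains s = d.contains s := by
  rw [List.contains_eq_mem, PySem.Dict.contains_eq_decide_mem_keys]
  simp [PySem.Dict.keys]

-- one step: either both sides unchanged, or a fresh class appended on both sides
theorem step_pair (d : PySem.Dict String Int) (i : Int) (c : Char) :
    ((tblStep d (i, c)).items = d.items
        ∧ checkStep (d.items.map Prod.fst) c = d.items.map Prod.fst)
    ∨ ∃ cls, (tblStep d (i, c)).items = d.items ++ [(cls, i)]
        ∧ checkStep (d.items.map Prod.fst) c = d.items.map Prod.fst ++ [cls] := by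
  unfold tblStep checkStep
  simp only [contains_map_fst, pU, pL, pD, pP]
  split_ifs with h1 h2 h3 h4
  · right
    refine ⟨pvUpper, ?_, rfl⟩
    exact PySem.Dict.items_insert_of_not_contains d i (by revert h1; cases d.contains pvUpper <;> simp)
  · right
    refine ⟨pvLower, ?_, rfl⟩
    exact PySem.Dict.items_insert_of_not_contains d i (by revert h2; cases d.contains pvLower <;> simp)
  · right
    refine ⟨pvDigits, ?_, rfl⟩
    exact PySem.Dict.items_insert_of_not_contains d i (by revert h3; cases d.contains pvDigits <;> simp)
  · right
    refine ⟨pvPunct, ?_, rfl⟩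
    exact PySem.Dict.items_insert_of_not_contains d i (by revert h4; cases d.contains pvPunct <;> simp)
  · left; exact ⟨rfl, rfl⟩

-- invariant: keys in insertion order = A's accumulator; recorded indices strictly increasing
theorem tbl_inv (cs : List Char) : ∀ (n : Int) (d : PySem.Dict String Int),
    d.items.Pairwise (fun p q => p.2 < q.2) →
    (∀ p ∈ d.items, p.2 < n) →
    ((PySem.List.enumerate cs n).foldl tblStep d).items.map Prod.fst
        = cs.foldl checkStep (d.items.map Prod.fst)
      ∧ ((PySem.List.enumerate cs n).foldl tblStep d).items.Pairwise (fun p q => p.2 < q.2) := by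
  induction cs with
  | nil =>
    intro n d hp _
    simp [PySem.List.enumerate_nil]
    exact hp
  | cons x xs ih =>
    intro n d hp hb
    rw [PySem.List.enumerate_cons]
    simp only [List.foldl_cons]
    rcases step_pair d n x with ⟨he, hc⟩ | ⟨cls, he, hc⟩
    · have hrec := ih (n + 1) (tblStep d (n, x))
        (by rw [he]; exact hp)
        (by rw [he]; intro p hpmem; exact lt_trans (hb p hpmem) (by omega))
      refine ⟨?_, hrec.2⟩
      rw [hrec.1, he, hc]
    · have hp' : (d.items ++ [(cls, n)]).Pairwise (fun p q => p.2 < q.2) := by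
        rw [List.pairwise_append]
        exact ⟨hp, List.pairwise_singleton _ _,
          fun a ha b hbm => by simp at hbm; rw [hbm]; exact hb a ha⟩
      have hrec := ih (n + 1) (tblStep d (n, x))
        (by rw [he]; exact hp')
        (by rw [he]; intro p hpmem
            rcases List.mem_append.1 hpmem with h | h
            · exact lt_trans (hb p h) (by omega)
            · simp at h; rw [h]; omega)
      refine ⟨?_, hrec.2⟩
      rw [hrec.1, he, hc]
      simp

-- membership in the table is exactly "first trigger position"
theorem charCases (c : Char) :
    (c = '1' ∨ c = 'U') ∨ (c = '2' ∨ c = 'L') ∨ (c = '3' ∨ c = 'D') ∨ (c = '4' ∨ c = 'P')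
      ∨ (pU c = false ∧ pL c = false ∧ pD c = false ∧ pP c = false) := by
  by_cases h1 : pU c = true
  · exact Or.inl (by simpa [pU] using h1)
  by_cases h2 : pL c = true
  · exact Or.inr (Or.inl (by simpa [pL] using h2))
  by_cases h3 : pD c = true
  · exact Or.inr (Or.inr (Or.inl (by simpa [pD] using h3)))
  by_cases h4 : pP c = true
  · exact Or.inr (Or.inr (Or.inr (Or.inl (by simpa [pP] using h4))))
  exact Or.inr (Or.inr (Or.inr (Or.inr
    ⟨Bool.not_eq_true _ ▸ eq_false_of_ne_true h1, Bool.not_eq_true _ ▸ eq_false_of_ne_true h2,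
     Bool.not_eq_true _ ▸ eq_false_of_ne_true h3, Bool.not_eq_true _ ▸ eq_false_of_ne_true h4⟩)))

theorem neUL : pvUpper ≠ pvLower := by decide
theorem neUD : pvUpper ≠ pvDigits := by decide
theorem neUP : pvUpper ≠ pvPunct := by decide
theorem neLD : pvLower ≠ pvDigits := by decide
theorem neLP : pvLower ≠ pvPunct := by decide
theorem neDP : pvDigits ≠ pvPunct := by decide

theorem tbl_mem (cs : List Char) : ∀ (n : Int) (d : PySem.Dict String Int) (cls : String) (i : Int),
    ((cls, i) ∈ ((PySem.List.enumerate cs n).foldl tblStep d).items ↔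
      (cls, i) ∈ d.items ∨ (d.contains cls = false ∧ D4 cs n cls i)) := by
  induction cs with
  | nil =>
    intro n d cls i
    simp [PySem.List.enumerate_nil, D4, firstPos]
  | cons x xs ih =>
    intro n d cls i
    rw [PySem.List.enumerate_cons]
    simp only [List.foldl_cons]
    rcases charCases x with hc | hc | hc | hc | ⟨h1, h2, h3, h4⟩
    · -- x triggers pvUpper
      have hpt : pU x = true := by rcases hc with rfl | rfl <;> rfl
      have hf1 : pL x = false := by rcases hc with rfl | rfl <;> rfl
      have hf2 : pD x = false := by rcases hc with rfl | rfl <;> rfl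
      have hf3 : pP x = false := by rcases hc with rfl | rfl <;> rfl
      cases hK : d.contains pvUpper with
      | true =>
        have hd : tblStep d (n, x) = d := by simp [tblStep, hpt, hf1, hf2, hf3, hK]
        rw [hd, ih]
        by_cases hcls : cls = pvUpper
        · subst hcls; simp [hK]
        · simp only [D4, firstPos, hpt, hf1, hf2, hf3]
          simp [hcls]
      | false =>
        have hins : tblStep d (n, x) = d.insert pvUpper n := by simp [tblStep, hpt, hf1, hf2, hf3, hK]
        rw [ih, hins, PySem.Dict.items_insert_of_not_contains d n hK, PySem.Dict.contains_insert]
        by_cases hcls : cls = pvUpper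
        · subst hcls
          simp [hK, D4, firstPos, hpt, hf1, hf2, hf3, neUL, neUD, neUP, Ne.symm neUL, Ne.symm neUD, Ne.symm neUP, eq_comm]
        · simp only [D4, firstPos, hpt, hf1, hf2, hf3]
          simp [hcls, Prod.ext_iff]
    · -- x triggers pvLower
      have hpt : pL x = true := by rcases hc with rfl | rfl <;> rfl
      have hf1 : pU x = false := by rcases hc with rfl | rfl <;> rfl
      have hf2 : pD x = false := by rcases hc with rfl | rfl <;> rfl
      have hf3 : pP x = false := by rcases hc with rfl | rfl <;> rfl
      cases hK : d.contains pvLower with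
      | true =>
        have hd : tblStep d (n, x) = d := by simp [tblStep, hpt, hf1, hf2, hf3, hK]
        rw [hd, ih]
        by_cases hcls : cls = pvLower
        · subst hcls; simp [hK]
        · simp only [D4, firstPos, hpt, hf1, hf2, hf3]
          simp [hcls]
      | false =>
        have hins : tblStep d (n, x) = d.insert pvLower n := by simp [tblStep, hpt, hf1, hf2, hf3, hK]
        rw [ih, hins, PySem.Dict.items_insert_of_not_contains d n hK, PySem.Dict.contains_insert]
        by_cases hcls : cls = pvLower
        · subst hcls
          simp [hK, D4, firstPos, hpt, hf1, hf2, hf3, Ne.symm neUL, neUL, neLD, neLP, Ne.symm neLD, Ne.symm neLP, eq_comm]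
        · simp only [D4, firstPos, hpt, hf1, hf2, hf3]
          simp [hcls, Prod.ext_iff]
    · -- x triggers pvDigits
      have hpt : pD x = true := by rcases hc with rfl | rfl <;> rfl
      have hf1 : pU x = false := by rcases hc with rfl | rfl <;> rfl
      have hf2 : pL x = false := by rcases hc with rfl | rfl <;> rfl
      have hf3 : pP x = false := by rcases hc with rfl | rfl <;> rfl
      cases hK : d.contains pvDigits with
      | true =>
        have hd : tblStep d (n, x) = d := by simp [tblStep, hpt, hf1, hf2, hf3, hK]
        rw [hd, ih]
        by_cases hcls : cls = pvDigits
        · subst hcls; simp [hK]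
        · simp only [D4, firstPos, hpt, hf1, hf2, hf3]
          simp [hcls]
      | false =>
        have hins : tblStep d (n, x) = d.insert pvDigits n := by simp [tblStep, hpt, hf1, hf2, hf3, hK]
        rw [ih, hins, PySem.Dict.items_insert_of_not_contains d n hK, PySem.Dict.contains_insert]
        by_cases hcls : cls = pvDigits
        · subst hcls
          simp [hK, D4, firstPos, hpt, hf1, hf2, hf3, Ne.symm neUD, neUD, Ne.symm neLD, neLD, neDP, Ne.symm neDP, eq_comm]
        · simp only [D4, firstPos, hpt, hf1, hf2, hf3]
          simp [hcls, Prod.ext_iff]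
    · -- x triggers pvPunct
      have hpt : pP x = true := by rcases hc with rfl | rfl <;> rfl
      have hf1 : pU x = false := by rcases hc with rfl | rfl <;> rfl
      have hf2 : pL x = false := by rcases hc with rfl | rfl <;> rfl
      have hf3 : pD x = false := by rcases hc with rfl | rfl <;> rfl
      cases hK : d.contains pvPunct with
      | true =>
        have hd : tblStep d (n, x) = d := by simp [tblStep, hpt, hf1, hf2, hf3, hK]
        rw [hd, ih]
        by_cases hcls : cls = pvPunct
        · subst hcls; simp [hK]
        · simp only [D4, firstPos, hpt, hf1, hf2, hf3]
          simp [hcls]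
      | false =>
        have hins : tblStep d (n, x) = d.insert pvPunct n := by simp [tblStep, hpt, hf1, hf2, hf3, hK]
        rw [ih, hins, PySem.Dict.items_insert_of_not_contains d n hK, PySem.Dict.contains_insert]
        by_cases hcls : cls = pvPunct
        · subst hcls
          simp [hK, D4, firstPos, hpt, hf1, hf2, hf3, Ne.symm neUP, neUP, Ne.symm neLP, neLP, Ne.symm neDP, neDP, eq_comm]
        · simp only [D4, firstPos, hpt, hf1, hf2, hf3]
          simp [hcls, Prod.ext_iff]
    · -- x triggers nothing
      have hd : tblStep d (n, x) = d := by simp [tblStep, h1, h2, h3, h4]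
      rw [hd, ih]
      simp only [D4, firstPos, h1, h2, h3, h4]
      simp

-- B side: the head of the positions list is the first trigger position
theorem head?_filter_enum (p : Char → Bool) (cs : List Char) : ∀ (n : Int),
    ((((PySem.List.enumerate cs n).filter (fun q => p q.2)).map Prod.fst)).head?
      = firstPos p cs n := by
  induction cs with
  | nil => intro n; simp [PySem.List.enumerate_nil, firstPos]
  | cons c t ih =>
    intro n
    rw [PySem.List.enumerate_cons]
    by_cases h : p c = true
    · simp [h, firstPos]
    · simp only [List.filter_cons]
      simp [h, firstPos, ih (n + 1)]

-- the singleton piece B appends for one class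
def optPiece (o : Option Int) (cls : String) : List (Int × String) :=
  match o with
  | none => []
  | some i => [(i, cls)]

-- B's entries, made explicit
def entriesOf (cs : List Char) : List (Int × String) :=
  optPiece (firstPos pU cs 0) pvUpper ++ optPiece (firstPos pL cs 0) pvLower
    ++ optPiece (firstPos pD cs 0) pvDigits ++ optPiece (firstPos pP cs 0) pvPunct

theorem entries_eq (s : String) :
    pvSpecs.foldl
      (fun entries spec =>
        let positions := ((PySem.List.enumerate s.toList 0).filter
          (fun q => q.2 == spec.1.1 || q.2 == spec.1.2)).map Prod.fst
        match positions with
        | [] => entries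
        | i :: _ => entries ++ [(i, spec.2)])
      ([] : List (Int × String)) = entriesOf s.toList := by
  simp only [entriesOf, ← head?_filter_enum, pvSpecs, List.foldl_cons, List.foldl_nil]
  simp only [pU, pL, pD, pP]
  cases hl1 : ((PySem.List.enumerate s.toList 0).filter (fun q => q.2 == '1' || q.2 == 'U')).map Prod.fst <;>
    cases hl2 : ((PySem.List.enumerate s.toList 0).filter (fun q => q.2 == '2' || q.2 == 'L')).map Prod.fst <;>
      cases hl3 : ((PySem.List.enumerate s.toList 0).filter (fun q => q.2 == '3' || q.2 == 'D')).map Prod.fst <;>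
        cases hl4 : ((PySem.List.enumerate s.toList 0).filter (fun q => q.2 == '4' || q.2 == 'P')).map Prod.fst <;>
          simp [optPiece]

theorem mem_optPiece (o : Option Int) (cls : String) (p : Int × String) :
    p ∈ optPiece o cls ↔ p.2 = cls ∧ o = some p.1 := by
  cases o with
  | none => simp [optPiece]
  | some j =>
    cases p with
    | mk a b => simp [optPiece, Prod.ext_iff, and_comm, eq_comm]

theorem mem_entriesOf (cs : List Char) (i : Int) (cls : String) :
    (i, cls) ∈ entriesOf cs ↔ D4 cs 0 cls i := by
  simp [entriesOf, D4, mem_optPiece]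

theorem nodup_entriesOf (cs : List Char) : (entriesOf cs).Nodup := by
  unfold entriesOf
  cases h1 : firstPos pU cs 0 <;> cases h2 : firstPos pL cs 0 <;>
    cases h3 : firstPos pD cs 0 <;> cases h4 : firstPos pP cs 0 <;>
      simp [optPiece, Prod.ext_iff, neUL, neUD, neUP, neLD, neLP, neDP]

-- ===== VERDICT (by name: the statement is the Claim_ definition above) =====
theorem check_spec : Claim_equal_check := by
  intro s _
  unfold Spec_check
  have hA : check s = s.toList.foldl checkStep [] := by
    unfold check
    have hlen : PySem.Str.len s = (s.toList.length : Int) := by simp [pysem]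
    rw [hlen]
    exact PySem.List.foldl_pyRange_zero_pyGetD' s.toList ' ' checkStep []
  have hinv := tbl_inv s.toList 0 PySem.Dict.empty (by simp [PySem.Dict.empty])
    (by simp [PySem.Dict.empty])
  have hentries : check_alt s
      = (PySem.List.sorted (entriesOf s.toList) (fun e => e.1)).map Prod.snd := by
    unfold check_alt
    rw [entries_eq]
  have hpw : ((tbl s.toList).items.map (fun p => (p.2, p.1))).Pairwise
      (fun a b : Int × String => a.1 < b.1) := by
    refine List.Pairwise.map _ ?_ hinv.2
    intro a b h
    exact h
  have hnm : ((tbl s.toList).items.map (fun p => (p.2, p.1))).Nodup :=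
    hpw.imp (fun h => by intro heq; rw [heq] at h; exact lt_irrefl _ h)
  have hperm : ((tbl s.toList).items.map (fun p => (p.2, p.1))).Perm (entriesOf s.toList) := by
    refine (List.perm_ext_iff_of_nodup hnm (nodup_entriesOf _)).2 ?_
    rintro ⟨i, cls⟩
    rw [mem_entriesOf]
    have hmm : (i, cls) ∈ (tbl s.toList).items.map (fun p => (p.2, p.1))
        ↔ (cls, i) ∈ (tbl s.toList).items := by
      constructor
      · intro hmem
        obtain ⟨⟨a, b⟩, hab, heq⟩ := List.mem_map.1 hmem
        simp only [Prod.mk.injEq] at heq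
        rwa [← heq.1, ← heq.2]
      · intro h
        exact List.mem_map.2 ⟨(cls, i), h, rfl⟩
    rw [hmm, tbl, tbl_mem]
    simp [PySem.Dict.empty]
  have hsorted : PySem.List.sorted (entriesOf s.toList) (fun e => e.1)
      = (tbl s.toList).items.map (fun p => (p.2, p.1)) :=
    PySem.List.sorted_eq_of_perm_of_pairwise_lt _ _ (fun e => e.1) hperm hpw
  rw [hentries, hsorted, hA]
  have h1 := hinv.1
  have hemp : (PySem.Dict.empty : PySem.Dict String Int).items.map Prod.fst = [] := rfl
  rw [hemp, ← tbl] at h1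
  rw [← h1, List.map_map]
  rfl
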